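-- pv_equiv track=rewrite | github.com/Leedefend/sce-backend-odoo | scripts/verify/scene_governance_user_flow_asset_export.py | _build_provider_gap
-- ===== SOURCE A (Python) =====
-- def _build_provider_gap(provider_rows: list[dict[str, str]]) -> str:
--     fallback_only = [row["scene_key"] for row in provider_rows if str(row.get("completeness_status") or "") == "fallback_only"]
--     missing = [row["scene_key"] for row in provider_rows if str(row.get("completeness_status") or "") == "missing"]
--     registered = [row["scene_key"] for row in provider_rows if str(row.get("completeness_status") or "") == "provider_registered"]
--     return (
--         f"provider_registered={len(registered)};"
--         f"fallback_only={len(fallback_only)}:{'|'.join(fallback_only) if fallback_only else 'none'};"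
--         f"missing={len(missing)}:{'|'.join(missing) if missing else 'none'}"
--     )
-- ===== SOURCE B (Python) =====
-- def _build_provider_gap(provider_rows: list[dict[str, str]]) -> str:
--     # No intermediate lists at all: one streaming pass maintaining, per status,
--     # a running count and (for the two joined groups) the already-joined text.
--     reg_n = 0
--     fb_n, fb_s = 0, "none"
--     mi_n, mi_s = 0, "none"
--     for row in provider_rows:
--         status = str(row.get("completeness_status") or "")
--         if status == "fallback_only":
--             key = row["scene_key"]
--             fb_s = key if fb_n == 0 else fb_s + "|" + key
--             fb_n += 1
--         elif status == "missing":
--             key = row["scene_key"]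
--             mi_s = key if mi_n == 0 else mi_s + "|" + key
--             mi_n += 1
--         elif status == "provider_registered":
--             reg_n += 1
--     return (
--         f"provider_registered={reg_n};"
--         f"fallback_only={fb_n}:{fb_s};"
--         f"missing={mi_n}:{mi_s}"
--     )
-- ===== Notes on version B (the rewrite author's own statement) =====
-- stated objective: alternative
-- what changed: Replaces A's three filtered list comprehensions plus a final '|'.join by one streaming pass that keeps no lists at all: per status it maintains only a running count and, for the two joined groups, the already-joined text (initialised to 'none'), so the output is assembled incrementally instead of from materialised groups.
import Mathlib
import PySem

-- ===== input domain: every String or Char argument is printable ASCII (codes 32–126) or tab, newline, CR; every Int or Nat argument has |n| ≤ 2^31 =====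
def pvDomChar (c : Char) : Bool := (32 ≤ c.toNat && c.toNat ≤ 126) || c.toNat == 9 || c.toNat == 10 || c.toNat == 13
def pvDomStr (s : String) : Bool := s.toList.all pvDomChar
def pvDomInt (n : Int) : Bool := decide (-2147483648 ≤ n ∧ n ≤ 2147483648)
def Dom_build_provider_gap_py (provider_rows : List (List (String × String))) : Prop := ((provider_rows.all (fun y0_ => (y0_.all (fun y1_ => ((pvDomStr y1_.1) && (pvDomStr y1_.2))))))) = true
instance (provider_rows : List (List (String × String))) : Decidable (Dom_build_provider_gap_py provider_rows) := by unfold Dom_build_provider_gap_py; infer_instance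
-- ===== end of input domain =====

-- B replaces A's three filtered comprehensions + final join by one streaming pass that keeps
-- counters and already-joined text instead of lists (objective: alternative; return value only).



-- ===== PORT A =====
-- dict lookup on an association list: first matching key (exact for Python's dict.get)
def pvLookup (row : List (String × String)) (k : String) : Option String :=
  (row.find? (fun p => p.1 == k)).map (·.2)

def pvStatus (row : List (String × String)) : String :=
  (pvLookup row "completeness_status").getD ""

-- row["scene_key"]; Pre_ guarantees the key is present wherever a port reads it
def pvSceneKey (row : List (String × String)) : String :=
  (pvLookup row "scene_key").getD ""

def pvFmt (keys : List String) : String :=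
  if keys.isEmpty then "none" else PySem.Str.join "|" keys

def build_provider_gap_py (provider_rows : List (List (String × String))) : String :=
  let fallback_only := (provider_rows.filter (fun row => pvStatus row == "fallback_only")).map pvSceneKey
  let missing := (provider_rows.filter (fun row => pvStatus row == "missing")).map pvSceneKey
  let registered := (provider_rows.filter (fun row => pvStatus row == "provider_registered")).map pvSceneKey
  "provider_registered=" ++ PySem.Int.toStr registered.length ++ ";" ++
    "fallback_only=" ++ PySem.Int.toStr fallback_only.length ++ ":" ++ pvFmt fallback_only ++ ";" ++
    "missing=" ++ PySem.Int.toStr missing.length ++ ":" ++ pvFmt missing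

-- ===== PORT B =====
-- state: (reg_n, (fb_n, fb_s), (mi_n, mi_s)) — counts and already-joined text, no lists
def pvStepB (acc : Int × (Int × String) × (Int × String)) (row : List (String × String)) :
    Int × (Int × String) × (Int × String) :=
  let status := pvStatus row
  if status == "fallback_only" then
    let key := pvSceneKey row
    (acc.1, (acc.2.1.1 + 1, if acc.2.1.1 == 0 then key else acc.2.1.2 ++ "|" ++ key), acc.2.2)
  else if status == "missing" then
    let key := pvSceneKey row
    (acc.1, acc.2.1, (acc.2.2.1 + 1, if acc.2.2.1 == 0 then key else acc.2.2.2 ++ "|" ++ key))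
  else if status == "provider_registered" then (acc.1 + 1, acc.2.1, acc.2.2)
  else acc

def build_provider_gap_py_alt (provider_rows : List (List (String × String))) : String :=
  let st := provider_rows.foldl pvStepB (0, (0, "none"), (0, "none"))
  "provider_registered=" ++ PySem.Int.toStr st.1 ++ ";" ++
    "fallback_only=" ++ PySem.Int.toStr st.2.1.1 ++ ":" ++ st.2.1.2 ++ ";" ++
    "missing=" ++ PySem.Int.toStr st.2.2.1 ++ ":" ++ st.2.2.2

-- ===== PRECONDITION & SPEC =====
-- Pre_ excludes exactly the inputs on which A raises KeyError: a row whose status is one of the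
-- three grouped values but which has no "scene_key" entry.
def Pre_build_provider_gap_py (provider_rows : List (List (String × String))) : Prop :=
  ∀ row ∈ provider_rows,
    pvStatus row ∈ (["fallback_only", "missing", "provider_registered"] : List String) →
      (pvLookup row "scene_key").isSome
instance (provider_rows : List (List (String × String))) : Decidable (Pre_build_provider_gap_py provider_rows) := by unfold Pre_build_provider_gap_py; infer_instance

def pvWitness_build_provider_gap_py : (List (List (String × String))) :=
  [[("scene_key", "s1"), ("completeness_status", "missing")], [("scene_key", "s2")]]

def Spec_build_provider_gap_py (provider_rows : List (List (String × String))) (out : String) : Prop := out = build_provider_gap_py_alt provider_rows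
instance (provider_rows : List (List (String × String))) (out : String) : Decidable (Spec_build_provider_gap_py provider_rows out) := by unfold Spec_build_provider_gap_py; infer_instance

-- ===== CLAIM (what is proved, stated in full; the proofs are below) =====
def Claim_equal_build_provider_gap_py : Prop := ∀ (provider_rows : List (List (String × String))), Dom_build_provider_gap_py provider_rows → Pre_build_provider_gap_py provider_rows → Spec_build_provider_gap_py provider_rows (build_provider_gap_py provider_rows)


-- ===== LEMMAS AND PROOFS =====
theorem join_append_single (s : String) (l : List String) (k : String) (h : l ≠ []) :
    PySem.Str.join s (l ++ [k]) = PySem.Str.join s l ++ s ++ k := by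
  induction l with
  | nil => simp at h
  | cons x xs ih =>
    cases xs with
    | nil =>
      show String.ofList _ = _
      rw [show (List.map String.toList ([x] ++ [k])) = [x.toList, k.toList] by simp,
        PySem.Chars.join_cons_cons, PySem.Chars.join_singleton]
      simp [String.ofList_append, String.ofList_toList, PySem.Str.join,
        PySem.Chars.join_singleton, String.append_assoc]
    | cons y ys =>
      have H := ih (by simp)
      show String.ofList _ = _
      simp only [PySem.Str.join, List.map_append, List.map, List.cons_append] at H ⊢
      rw [PySem.Chars.join_cons_cons, PySem.Chars.join_cons_cons,
        String.ofList_append, String.ofList_append, String.ofList_append, String.ofList_append,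
        String.ofList_toList, String.ofList_toList]
      rw [String.append_assoc, String.append_assoc, H]
      simp [String.append_assoc]

theorem join_single (s k : String) : PySem.Str.join s [k] = k := by
  show String.ofList _ = _
  rw [show (List.map String.toList [k]) = [k.toList] by simp, PySem.Chars.join_singleton,
    String.ofList_toList]

-- the fused state of B after some rows, expressed through A's filtered groups
theorem pvFmt_append (l : List String) (k : String) :
    pvFmt (l ++ [k]) = (if (l.length : Int) == 0 then k else pvFmt l ++ "|" ++ k) := by
  cases l with
  | nil => simp [pvFmt, join_single]
  | cons x xs =>
    have hA : ¬ ((((x :: xs) ++ [k] : List String).isEmpty) = true) := by simp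
    have hB : ¬ (((x :: xs : List String).isEmpty) = true) := by simp
    have hC : ¬ ((((x :: xs).length : Int) == 0) = true) := by
      simp
      omega
    simp only [pvFmt, if_neg hA, if_neg hB, if_neg hC]
    exact join_append_single _ _ _ (by simp)

theorem pvFoldB_eq (provider_rows : List (List (String × String)))
    (f m r : List String) :
    provider_rows.foldl pvStepB ((r.length : Int), ((f.length : Int), pvFmt f), ((m.length : Int), pvFmt m)) =
      (((r ++ (provider_rows.filter (fun row => pvStatus row == "provider_registered")).map pvSceneKey).length : Int),
       (((f ++ (provider_rows.filter (fun row => pvStatus row == "fallback_only")).map pvSceneKey).length : Int),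
        pvFmt (f ++ (provider_rows.filter (fun row => pvStatus row == "fallback_only")).map pvSceneKey)),
       (((m ++ (provider_rows.filter (fun row => pvStatus row == "missing")).map pvSceneKey).length : Int),
        pvFmt (m ++ (provider_rows.filter (fun row => pvStatus row == "missing")).map pvSceneKey))) := by
  induction provider_rows generalizing f m r with
  | nil => simp
  | cons row rest ih =>
    simp only [List.foldl_cons, List.filter_cons]
    by_cases h1 : pvStatus row = "fallback_only"
    · have step : pvStepB ((r.length : Int), ((f.length : Int), pvFmt f), ((m.length : Int), pvFmt m)) row =
          ((r.length : Int), (((f ++ [pvSceneKey row]).length : Int), pvFmt (f ++ [pvSceneKey row])), ((m.length : Int), pvFmt m)) := by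
        simp [pvStepB, h1, pvFmt_append]
      rw [step, ih (f ++ [pvSceneKey row]) m r]
      simp [h1]
    · by_cases h2 : pvStatus row = "missing"
      · have step : pvStepB ((r.length : Int), ((f.length : Int), pvFmt f), ((m.length : Int), pvFmt m)) row =
            ((r.length : Int), ((f.length : Int), pvFmt f), (((m ++ [pvSceneKey row]).length : Int), pvFmt (m ++ [pvSceneKey row]))) := by
          simp [pvStepB, h2, pvFmt_append]
        rw [step, ih f (m ++ [pvSceneKey row]) r]
        simp [h2]
      · by_cases h3 : pvStatus row = "provider_registered"
        · have step : pvStepB ((r.length : Int), ((f.length : Int), pvFmt f), ((m.length : Int), pvFmt m)) row =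
              (((r ++ [pvSceneKey row]).length : Int), ((f.length : Int), pvFmt f), ((m.length : Int), pvFmt m)) := by
            simp [pvStepB, h3]
          rw [step, ih f m (r ++ [pvSceneKey row])]
          simp [h3]
        · have step : pvStepB ((r.length : Int), ((f.length : Int), pvFmt f), ((m.length : Int), pvFmt m)) row =
              ((r.length : Int), ((f.length : Int), pvFmt f), ((m.length : Int), pvFmt m)) := by
            simp [pvStepB, h1, h2, h3]
          rw [step, ih f m r]
          simp [h1, h2, h3]

-- ===== VERDICT (by name: the statements are the Claim_ definitions above) =====
theorem build_provider_gap_py_spec : Claim_equal_build_provider_gap_py := by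
  intro provider_rows _ _
  unfold Spec_build_provider_gap_py build_provider_gap_py build_provider_gap_py_alt
  have := pvFoldB_eq provider_rows [] [] []
  simp only [List.length_nil, Int.natCast_zero, List.nil_append] at this
  rw [show pvFmt [] = "none" from rfl] at this
  rw [this]
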